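-- pv_equiv track=rewrite | github.com/rjamesy/calleroo | backend_v2/engine/extract.py | extract_yes_no_value
-- ===== SOURCE A (Python) =====
-- from typing import Dict, Any, Optional, List, Tuple
--
-- def extract_yes_no_value(user_message: str) -> Optional[str]:
--     """
--     Extract a YES/NO value from user message.
--
--     Returns:
--         "YES", "NO", or None if not determinable
--     """
--     message_lower = user_message.lower().strip()
--
--     yes_patterns = ["yes", "yeah", "yep", "sure", "ok", "okay", "yup", "absolutely", "definitely", "please", "y"]
--     no_patterns = ["no", "nope", "nah", "not", "don't", "dont", "n"]
--
--     for pattern in yes_patterns: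
--         if message_lower == pattern or message_lower.startswith(pattern + " "):
--             return "YES"
--
--     for pattern in no_patterns:
--         if message_lower == pattern or message_lower.startswith(pattern + " "):
--             return "NO"
--
--     return None
-- ===== SOURCE B (Python) =====
-- def extract_yes_no_value(user_message):
--     """
--     Extract a YES/NO value from user message.
--
--     Returns:
--         "YES", "NO", or None if not determinable
--     """
--     message_lower = user_message.lower().strip()
--     prefix, _, _ = message_lower.partition(" ")
--     answers = {
--         "yes": "YES", "yeah": "YES", "yep": "YES", "sure": "YES", "ok": "YES",
--         "okay": "YES", "yup": "YES", "absolutely": "YES", "definitely": "YES",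
--         "please": "YES", "y": "YES",
--         "no": "NO", "nope": "NO", "nah": "NO", "not": "NO", "don't": "NO",
--         "dont": "NO", "n": "NO",
--     }
--     return answers.get(prefix)
-- ===== Notes on version B (the rewrite author's own statement) =====
-- stated objective: simpler
-- what changed: Replaced A's two sequential pattern-scan loops (each testing 'equals pattern or starts with pattern + space') by extracting the first space-delimited token once with str.partition and answering with a single lookup in one pattern-to-answer dict.
import Mathlib
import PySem

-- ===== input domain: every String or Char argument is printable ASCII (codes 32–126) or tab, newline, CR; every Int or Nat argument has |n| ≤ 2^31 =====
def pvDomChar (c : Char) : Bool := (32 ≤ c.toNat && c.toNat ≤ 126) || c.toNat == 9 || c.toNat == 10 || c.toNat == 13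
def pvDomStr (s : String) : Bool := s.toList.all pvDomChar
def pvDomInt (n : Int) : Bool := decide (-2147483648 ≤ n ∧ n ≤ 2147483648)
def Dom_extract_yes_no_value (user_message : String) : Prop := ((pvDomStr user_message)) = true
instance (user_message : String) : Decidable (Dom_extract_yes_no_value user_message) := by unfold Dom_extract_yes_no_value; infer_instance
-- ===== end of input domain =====

-- B replaces A's two sequential pattern-scan loops by extracting the first space-delimited
-- token once (str.partition) and answering with one lookup in a pattern→answer dict (objective: simpler).

-- ===== PORT A =====
def pvYesPatterns : List (List Char) :=
  [['y','e','s'], ['y','e','a','h'], ['y','e','p'], ['s','u','r','e'], ['o','k'],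
   ['o','k','a','y'], ['y','u','p'], ['a','b','s','o','l','u','t','e','l','y'],
   ['d','e','f','i','n','i','t','e','l','y'], ['p','l','e','a','s','e'], ['y']]

def pvNoPatterns : List (List Char) :=
  [['n','o'], ['n','o','p','e'], ['n','a','h'], ['n','o','t'],
   ['d','o','n','\'','t'], ['d','o','n','t'], ['n']]

-- the 'for pattern in …: if message_lower == pattern or message_lower.startswith(pattern + " "): return res' loop
def pvScan (ml : List Char) (pats : List (List Char)) (res : String) : Option String :=
  match pats with
  | [] => none
  | p :: rest =>
    if ml == p || PySem.Chars.startswith ml (p ++ [' ']) then some res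
    else pvScan ml rest res

def extract_yes_no_value (user_message : String) : Option String :=
  let message_lower := PySem.Chars.strip (PySem.Chars.lower user_message.toList)
  match pvScan message_lower pvYesPatterns "YES" with
  | some r => some r
  | none => pvScan message_lower pvNoPatterns "NO"

-- ===== PORT B =====
-- the dict literal 'answers' of Source B (association list, insertion order; all keys distinct)
def pvAnswers : List (String × String) :=
  [("yes", "YES"), ("yeah", "YES"), ("yep", "YES"), ("sure", "YES"), ("ok", "YES"),
   ("okay", "YES"), ("yup", "YES"), ("absolutely", "YES"), ("definitely", "YES"),
   ("please", "YES"), ("y", "YES"),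
   ("no", "NO"), ("nope", "NO"), ("nah", "NO"), ("not", "NO"), ("don't", "NO"),
   ("dont", "NO"), ("n", "NO")]

def extract_yes_no_value_alt (user_message : String) : Option String :=
  let message_lower := PySem.Chars.strip (PySem.Chars.lower user_message.toList)
  -- str.partition(" ") with the one-character separator " ": its first component is
  -- exactly the maximal prefix containing no ' ' (exact, hand-ported; only this
  -- component of the triple is used)
  let pre := message_lower.takeWhile (fun c => !(c == ' '))
  pvAnswers.lookup (String.ofList pre)

-- ===== PRECONDITION & SPEC =====
def Spec_extract_yes_no_value (user_message : String) (out : Option String) : Prop := out = extract_yes_no_value_alt user_message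
instance (user_message : String) (out : Option String) : Decidable (Spec_extract_yes_no_value user_message out) := by unfold Spec_extract_yes_no_value; infer_instance

-- ===== CLAIM (what is proved, stated in full; the proofs are below) =====
def Claim_equal_extract_yes_no_value : Prop := ∀ (user_message : String), Dom_extract_yes_no_value user_message → Spec_extract_yes_no_value user_message (extract_yes_no_value user_message)

-- ===== LEMMAS AND PROOFS =====

-- head of a dropWhile result falsifies the predicate
theorem pv_dropWhile_head_false (p : Char → Bool) (x : Char) (xs l : List Char)
    (h : l.dropWhile p = x :: xs) : p x = false := by
  induction l with
  | nil => simp at h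
  | cons a t ih =>
    by_cases ha : p a
    · rw [List.dropWhile_cons_of_pos ha] at h; exact ih h
    · rw [List.dropWhile_cons_of_neg ha] at h
      cases h; simpa using ha

-- takeWhile over "word ++ ' ' :: rest" stops exactly after the word
theorem pv_takeWhile_stop (p rest : List Char) (h : ' ' ∉ p) :
    (p ++ ' ' :: rest).takeWhile (fun c => !(c == ' ')) = p := by
  induction p with
  | nil => simp
  | cons a t ih =>
    have ha : a ≠ ' ' := fun hs => h (by simp [hs])
    simp only [List.cons_append, List.takeWhile_cons, ha, ne_eq,
      not_false_eq_true, Bool.not_eq_eq_eq_not, Bool.not_true, beq_eq_false_iff_ne, if_pos]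
    rw [ih (fun hm => h (List.mem_cons_of_mem a hm))]

-- A's per-pattern test equals "the first token is the pattern" (space-free nonempty pattern)
theorem pv_match_iff (ml p : List Char) (hne : p ≠ []) (hsp : ' ' ∉ p) :
    (ml == p || PySem.Chars.startswith ml (p ++ [' '])) =
      (ml.takeWhile (fun c => !(c == ' ')) == p) := by
  rw [Bool.eq_iff_iff]
  simp only [Bool.or_eq_true, beq_iff_eq, PySem.Chars.startswith_iff]
  constructor
  · rintro (rfl | ⟨rest, rfl⟩)
    · exact List.takeWhile_eq_self_iff.mpr (fun a ha => by
        simp only [Bool.not_eq_eq_eq_not, Bool.not_true, beq_eq_false_iff_ne, ne_eq]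
        exact fun h => hsp (h ▸ ha))
    · rw [List.append_assoc, List.singleton_append]
      exact pv_takeWhile_stop p rest hsp
  · intro h
    have hsplit := List.takeWhile_append_dropWhile (p := fun c => !(c == ' ')) (l := ml)
    cases hd : ml.dropWhile (fun c => !(c == ' ')) with
    | nil =>
      left
      rw [← hsplit, hd, List.append_nil, h]
    | cons x xs =>
      right
      have hx : x = ' ' := by
        have := pv_dropWhile_head_false _ x xs ml hd
        simpa using this
      refine ⟨xs, ?_⟩
      rw [List.append_assoc, List.singleton_append, ← hx, ← h, ← hd, hsplit]

-- A's scan loop answers exactly "is the first token one of the patterns"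
theorem pv_scan_eq (ml : List Char) (pats : List (List Char)) (res : String)
    (h : ∀ p ∈ pats, p ≠ [] ∧ ' ' ∉ p) :
    pvScan ml pats res =
      if ml.takeWhile (fun c => !(c == ' ')) ∈ pats then some res else none := by
  induction pats with
  | nil => simp [pvScan]
  | cons p rest ih =>
    obtain ⟨h1, h2⟩ := h p (List.mem_cons_self)
    rw [pvScan, pv_match_iff ml p h1 h2]
    by_cases hq : ml.takeWhile (fun c => !(c == ' ')) = p
    · simp [hq]
    · simp only [beq_eq_false_iff_ne.mpr hq, Bool.false_eq_true, if_false, List.mem_cons,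
        hq, false_or]
      exact ih (fun q hqm => h q (List.mem_cons_of_mem p hqm))

-- injecting the keys through String.ofList does not change association-list lookup
theorem pv_lookup_map_ofList (l : List (List Char × String)) (t : List Char) :
    (l.map (fun p => (String.ofList p.1, p.2))).lookup (String.ofList t) = l.lookup t := by
  induction l with
  | nil => simp
  | cons kv rest ih =>
    by_cases hk : t = kv.1
    · simp [List.lookup, hk]
    · have hs : String.ofList t ≠ String.ofList kv.1 := by
        simp [← String.toList_inj, String.toList_ofList, hk]
      simp [List.lookup, beq_eq_false_iff_ne.mpr hs, beq_eq_false_iff_ne.mpr hk, ih]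

-- lookup in a constant-valued block of an association list
theorem pv_lookup_const (t : List Char) (ks : List (List Char)) (v : String)
    (rest : List (List Char × String)) :
    ((ks.map (fun k => (k, v))) ++ rest).lookup t =
      if t ∈ ks then some v else rest.lookup t := by
  induction ks with
  | nil => simp
  | cons k ks ih =>
    by_cases hk : t = k
    · simp [hk]
    · simp [List.lookup, beq_eq_false_iff_ne.mpr hk, hk, ih]

theorem pv_lookup_const_nil (t : List Char) (ks : List (List Char)) (v : String) :
    (ks.map (fun k => (k, v))).lookup t = if t ∈ ks then some v else none := by
  have := pv_lookup_const t ks v []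
  simpa using this

-- Source B's string-keyed dict is the two pattern lists paired with their constant answers
theorem pv_answers_split :
    pvAnswers = ((pvYesPatterns.map (fun k => (k, "YES"))
                 ++ pvNoPatterns.map (fun k => (k, "NO"))).map
                   (fun p => (String.ofList p.1, p.2))) := by
  rfl

-- ===== VERDICT (by name: the statement is the Claim_ definition above) =====
theorem extract_yes_no_value_spec : Claim_equal_extract_yes_no_value := by
  intro um _
  unfold Spec_extract_yes_no_value extract_yes_no_value extract_yes_no_value_alt
  simp only []
  set ml := PySem.Chars.strip (PySem.Chars.lower um.toList) with hml
  rw [pv_answers_split, pv_lookup_map_ofList,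
      pv_lookup_const _ pvYesPatterns "YES" _,
      pv_lookup_const_nil _ pvNoPatterns "NO",
      pv_scan_eq ml pvYesPatterns "YES" (by decide),
      pv_scan_eq ml pvNoPatterns "NO" (by decide)]
  by_cases h1 : ml.takeWhile (fun c => !(c == ' ')) ∈ pvYesPatterns
  · simp [h1]
  · by_cases h2 : ml.takeWhile (fun c => !(c == ' ')) ∈ pvNoPatterns <;> simp [h1, h2]
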